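-- pv_equiv track=rewrite | github.com/jschalk/pale | src/ch00_py/notebook_toolbox.py | get_marimo_cells
-- ===== SOURCE A (Python) =====
-- from typing import List
-- from typing import List
--
-- def get_marimo_cells(function_str: str) -> List[str]:
--     # sourcery skip: remove-redundant-slice-index, str-prefix-suffix
--     """
--     Split a Python function string into cells using comment boundaries.
--
--     Rules:
--     - A comment line creates a new cell.
--     - Lines continue in the same cell until a new comment
--       appears after a non-comment line.
--     - Blank lines belong to the current cell.
--     """
--
--     lines = function_str.splitlines(keepends=True)
--
--     cells: list[list[str]] = []
--     current_cell: list[str] = []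
--
--     def is_comment(line: str) -> bool:
--         return line.lstrip()[0:1] == "#"
--
--     prev_was_code = False
--
--     for line in lines:
--         comment = is_comment(line)
--
--         # Start new cell when:
--         # 1) first comment encountered
--         # 2) comment follows code
--         if comment and (prev_was_code or not current_cell) and current_cell:
--             cells.append(current_cell)
--             current_cell = []
--
--         current_cell.append(line)
--
--         # Track whether previous meaningful line was code
--         if line.strip() != "":
--             prev_was_code = not comment
--
--     if current_cell:
--         cells.append(current_cell)
--
--     cells = cells[1:]
--
--     for cell in cells:
--         cell.insert(0, "@app.cell\ndef _():\n")
--         cell.append("    return\n\n\n")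
--
--     # join lines back into strings
--     return ["".join(cell) for cell in cells]
-- ===== SOURCE B (Python) =====
-- def get_marimo_cells(function_str: str):
--     """Two-pass rewrite: first collect cell-boundary indices, then slice."""
--     lines = function_str.splitlines(keepends=True)
--     starts = []
--     prev_was_code = False
--     for i, line in enumerate(lines):
--         comment = line.lstrip()[:1] == "#"
--         if comment and prev_was_code:
--             starts.append(i)
--         if line.strip():
--             prev_was_code = not comment
--     starts.append(len(lines))
--     return [
--         "@app.cell\ndef _():\n" + "".join(lines[s:e]) + "    return\n\n\n"
--         for s, e in zip(starts, starts[1:])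
--     ]
-- ===== Notes on version B (the rewrite author's own statement) =====
-- stated objective: alternative
-- what changed: B separates boundary detection from cell construction: a first pass records the start index of every cell boundary, a second pass slices the line list between consecutive start indices and wraps each slice, instead of A's single state machine that accumulates cells inline.
import Mathlib
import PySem

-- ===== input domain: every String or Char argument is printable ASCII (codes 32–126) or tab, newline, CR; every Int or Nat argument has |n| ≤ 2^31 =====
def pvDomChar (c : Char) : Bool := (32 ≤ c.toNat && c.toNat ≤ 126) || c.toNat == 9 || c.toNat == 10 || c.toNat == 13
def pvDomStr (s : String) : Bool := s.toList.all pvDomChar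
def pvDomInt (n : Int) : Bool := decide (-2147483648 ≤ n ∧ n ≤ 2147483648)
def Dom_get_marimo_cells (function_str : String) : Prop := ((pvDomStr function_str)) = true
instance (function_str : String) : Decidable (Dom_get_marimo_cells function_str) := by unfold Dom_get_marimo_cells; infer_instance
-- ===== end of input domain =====

-- B re-implements A by two passes — collect boundary indices, then slice and wrap — instead of A's
-- inline cell-accumulating state machine; same cost, different decomposition ("alternative").

-- Shared primitive: str.splitlines(keepends=True), hand port (PySem.Str.splitlines drops the ends).
-- Exact on Dom: the only line breaks among printable ASCII + tab/newline/CR are '\n', '\r', '\r\n'.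
def pvSplitlinesK : List Char → List (List Char)
  | [] => []
  | '\r' :: '\n' :: rest => ['\r', '\n'] :: pvSplitlinesK rest
  | c :: rest =>
    if c = '\n' || c = '\r' then [c] :: pvSplitlinesK rest
    else
      match pvSplitlinesK rest with
      | [] => [[c]]
      | l :: ls => (c :: l) :: ls

-- Shared helper: is_comment(line) = (line.lstrip()[0:1] == "#"), on code points.
def pvIsComment (l : List Char) : Bool :=
  PySem.Chars.slice (PySem.Chars.lstrip l) (some 0) (some 1) == ['#']

def pvHeader : List Char := "@app.cell\ndef _():\n".toList
def pvFooter : List Char := "    return\n\n\n".toList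

-- ===== PORT A =====
-- loop body of A: state (cells, current_cell, prev_was_code)
def pvStepA (st : List (List (List Char)) × List (List Char) × Bool) (line : List Char) :
    List (List (List Char)) × List (List Char) × Bool :=
  match st with
  | (cells, cur, prev) =>
    let comment := pvIsComment line
    let prev2 := if (PySem.Chars.strip line).isEmpty then prev else !comment
    if comment && (prev || cur.isEmpty) && !cur.isEmpty then
      (cells ++ [cur], ([line] : List (List Char)), prev2)
    else (cells, cur ++ [line], prev2)

def get_marimo_cells (function_str : String) : List String :=
  let lines := pvSplitlinesK function_str.toList
  let st := lines.foldl pvStepA ([], [], false)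
  let cells := st.1 ++ (if st.2.1.isEmpty then [] else [st.2.1])
  let cells := PySem.List.slice cells (some 1) none
  cells.map (fun cell => String.ofList (PySem.Chars.join [] (pvHeader :: (cell ++ [pvFooter]))))

-- ===== PORT B =====
-- first pass of B: state (starts, prev_was_code), folded over enumerate(lines)
def pvStepB (st : List Int × Bool) (p : Int × List Char) : List Int × Bool :=
  let comment := pvIsComment p.2
  let bs := if comment && st.2 then st.1 ++ [p.1] else st.1
  let prev := if (PySem.Chars.strip p.2).isEmpty then st.2 else !comment
  (bs, prev)

def get_marimo_cells_alt (function_str : String) : List String :=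
  let lines := pvSplitlinesK function_str.toList
  let st := (PySem.List.enumerate lines).foldl pvStepB ([], false)
  let starts := st.1 ++ [(lines.length : Int)]
  (starts.zip starts.tail).map (fun se =>
    String.ofList (PySem.Chars.join []
      (pvHeader :: (PySem.List.slice lines (some se.1) (some se.2) ++ [pvFooter]))))

-- ===== PRECONDITION & SPEC =====
def Spec_get_marimo_cells (function_str : String) (out : List String) : Prop := out = get_marimo_cells_alt function_str
instance (function_str : String) (out : List String) : Decidable (Spec_get_marimo_cells function_str out) := by unfold Spec_get_marimo_cells; infer_instance

-- ===== CLAIM (what is proved, stated in full; the proofs are below) =====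
def Claim_equal_get_marimo_cells : Prop := ∀ (function_str : String), Dom_get_marimo_cells function_str → Spec_get_marimo_cells function_str (get_marimo_cells function_str)

-- ===== LEMMAS AND PROOFS =====

-- the common prev_was_code update
def pvPrevStep (p : Bool) (l : List Char) : Bool :=
  if (PySem.Chars.strip l).isEmpty then p else !(pvIsComment l)

-- characterisation of A's loop: the list of cells it splits into
def pvGF : List (List Char) → List (List Char) → Bool → List (List (List Char))
  | cur, [], _ => if cur.isEmpty then [] else [cur]
  | cur, l :: t, p =>
    if pvIsComment l && (p || cur.isEmpty) && !cur.isEmpty then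
      cur :: pvGF [l] t (pvPrevStep p l)
    else pvGF (cur ++ [l]) t (pvPrevStep p l)

-- characterisation of B's first pass: relative boundary indices
def pvBnds : List (List Char) → Bool → List Nat
  | [], _ => []
  | l :: t, p =>
    if pvIsComment l && p then 0 :: (pvBnds t (pvPrevStep p l)).map (· + 1)
    else (pvBnds t (pvPrevStep p l)).map (· + 1)

def pvSlices (t : List (List Char)) (ss : List Nat) : List (List (List Char)) :=
  (ss.zip ss.tail).map (fun se => (t.drop se.1).take (se.2 - se.1))

lemma pvA1 (t : List (List Char)) (cells : List (List (List Char))) (cur : List (List Char)) (p : Bool) :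
    (t.foldl pvStepA (cells, cur, p)).1
      ++ (if (t.foldl pvStepA (cells, cur, p)).2.1.isEmpty then []
          else [(t.foldl pvStepA (cells, cur, p)).2.1])
      = cells ++ pvGF cur t p := by
  induction t generalizing cells cur p with
  | nil =>
    simp [pvGF]
  | cons l t ih =>
    rw [List.foldl_cons]
    by_cases h : pvIsComment l && (p || cur.isEmpty) && !cur.isEmpty
    · simp only [pvStepA, h, if_true]
      rw [ih]
      simp [pvGF, pvPrevStep, h]
    · simp only [pvStepA, h]
      rw [ih]
      simp [pvGF, pvPrevStep, h]

lemma pvB1 (t : List (List Char)) (k : Nat) (bs : List Int) (p : Bool) :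
    ((PySem.List.enumerate t (k : Int)).foldl pvStepB (bs, p)).1
      = bs ++ (pvBnds t p).map (fun n => ((n + k : Nat) : Int)) := by
  induction t generalizing k bs p with
  | nil => simp [PySem.List.enumerate, pvBnds]
  | cons l t ih =>
    have he : PySem.List.enumerate (l :: t) (k : Int)
        = ((k : Int), l) :: PySem.List.enumerate t ((k + 1 : Nat) : Int) := by
      simp [PySem.List.enumerate]
    rw [he, List.foldl_cons]
    by_cases hc : pvIsComment l && p
    · simp only [pvStepB, hc, if_true]
      rw [ih]
      simp [pvBnds, pvPrevStep, hc, List.map_map, List.append_assoc]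
      intro a _
      ring
    · simp only [pvStepB, hc]
      rw [ih]
      simp [pvBnds, pvPrevStep, hc, List.map_map]
      intro a _
      ring

-- shifting the slice window down one cell
lemma pvShift (l : List Char) (t : List (List Char)) (ss : List Nat) :
    pvSlices (l :: t) (ss.map (· + 1)) = pvSlices t ss := by
  unfold pvSlices
  have ht : (ss.map (· + 1)).tail = ss.tail.map (· + 1) := by cases ss <;> simp
  rw [ht, List.zip_map, List.map_map]
  apply List.map_congr_left
  intro se _
  simp [Prod.map, List.drop_succ_cons, Nat.succ_sub_succ]

lemma pvM (t : List (List Char)) (p : Bool) (cur : List (List Char)) (hcur : cur ≠ []) :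
    pvGF cur t p
      = (cur ++ t.take ((pvBnds t p).headD t.length)) :: pvSlices t (pvBnds t p ++ [t.length]) := by
  induction t generalizing p cur with
  | nil => simp [pvGF, pvBnds, pvSlices, hcur]
  | cons l t ih =>
    have hce : cur.isEmpty = false := by simp [hcur]
    by_cases hc : pvIsComment l && p
    · have hcond : (pvIsComment l && (p || cur.isEmpty) && !cur.isEmpty) = true := by
        simp_all
      rw [pvGF, if_pos hcond, ih (pvPrevStep p l) [l] (by simp)]
      simp only [pvBnds, hc, if_true]
      cases hB : pvBnds t (pvPrevStep p l) with
      | nil => simp [pvSlices, List.take_length]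
      | cons b bs =>
        rw [← pvShift l t ((b :: bs) ++ [t.length])]
        simp [pvSlices]
    · have hcond : (pvIsComment l && (p || cur.isEmpty) && !cur.isEmpty) = false := by
        simp_all
      rw [pvGF, if_neg (by simp [hcond]), ih (pvPrevStep p l) (cur ++ [l]) (by simp)]
      simp only [pvBnds, hc]
      cases hB : pvBnds t (pvPrevStep p l) with
      | nil => simp [pvSlices, List.take_length]
      | cons b bs =>
        rw [← pvShift l t ((b :: bs) ++ [t.length])]
        simp [pvSlices]

-- ===== VERDICT (by name: the statement is the Claim_ definition above) =====
theorem get_marimo_cells_spec : Claim_equal_get_marimo_cells := by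
  intro s _
  show get_marimo_cells s = get_marimo_cells_alt s
  unfold get_marimo_cells get_marimo_cells_alt
  simp only []
  generalize pvSplitlinesK s.toList = L
  cases L with
  | nil => rfl
  | cons l t =>
    rw [pvA1, PySem.List.slice_from_one]
    rw [show PySem.List.enumerate (l :: t) = PySem.List.enumerate (l :: t) ((0:Nat):Int) from rfl, pvB1]
    rw [show pvGF [] (l :: t) false = pvGF [l] t (pvPrevStep false l) from by rw [pvGF]; simp]
    rw [pvM t (pvPrevStep false l) [l] (by simp)]
    rw [show pvBnds (l :: t) false = (pvBnds t (pvPrevStep false l)).map (· + 1) from by rw [pvBnds]; simp]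
    simp only [List.nil_append, List.tail_cons]
    set B' := pvBnds t (pvPrevStep false l) with hB'
    set ss := B' ++ [t.length] with hss
    have hs : (List.map (fun n : Nat => ((n + 0 : Nat) : Int)) (List.map (fun x => x + 1) B') ++ [((l :: t).length : Int)])
        = ss.map (fun n : Nat => ((n + 1 : Nat) : Int)) := by
      simp only [hss, List.map_map, List.map_append, List.map_cons, List.map_nil, List.length_cons]
      congr 1
    rw [hs]
    have ht : (ss.map (fun n : Nat => ((n + 1 : Nat) : Int))).tail
        = ss.tail.map (fun n : Nat => ((n + 1 : Nat) : Int)) := by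
      cases hc : ss <;> simp
    rw [ht, List.zip_map, List.map_map]
    unfold pvSlices
    rw [List.map_map]
    apply List.map_congr_left
    intro se _
    simp only [Function.comp_apply, Prod.map]
    rw [PySem.List.slice_natCast]
    simp [List.drop_succ_cons, Nat.succ_sub_succ]
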